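-- pv_equiv track=rewrite | github.com/odobromyrova/advent-of-code | 2020/scripts/day_5.py | get_seat_number_info
-- ===== SOURCE A (Python) =====
-- def get_seat_number_info(seating_record, n_seat_indicating_chars, total_seats_number):
--     seat_list = [i for i in range(total_seats_number)]
--     mid_point = int(total_seats_number / 2)
--
--     for char in seating_record[n_seat_indicating_chars:]:
--         if char == 'L':
--             seat_list = seat_list[:mid_point]
--             mid_point = int(len(seat_list) / 2)
--
--         if char == 'R':
--             seat_list = seat_list[mid_point:]
--             mid_point = int(len(seat_list) / 2)
--
--     return seat_list[0]
-- ===== SOURCE B (Python) =====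
-- def get_seat_number_info(seating_record, n_seat_indicating_chars, total_seats_number):
--     low = 0
--     length = total_seats_number
--     for char in seating_record[n_seat_indicating_chars:]:
--         if char == 'L':
--             length //= 2
--         elif char == 'R':
--             half = length // 2
--             low += half
--             length -= half
--     return low
-- ===== Notes on version B (the rewrite author's own statement) =====
-- stated objective: alternative
-- what changed: B tracks only the low index and interval length with integer halving instead of materialising and repeatedly slicing a list of all seat numbers (O(len(record)) arithmetic vs building an O(total_seats_number) list).
import Mathlib
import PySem

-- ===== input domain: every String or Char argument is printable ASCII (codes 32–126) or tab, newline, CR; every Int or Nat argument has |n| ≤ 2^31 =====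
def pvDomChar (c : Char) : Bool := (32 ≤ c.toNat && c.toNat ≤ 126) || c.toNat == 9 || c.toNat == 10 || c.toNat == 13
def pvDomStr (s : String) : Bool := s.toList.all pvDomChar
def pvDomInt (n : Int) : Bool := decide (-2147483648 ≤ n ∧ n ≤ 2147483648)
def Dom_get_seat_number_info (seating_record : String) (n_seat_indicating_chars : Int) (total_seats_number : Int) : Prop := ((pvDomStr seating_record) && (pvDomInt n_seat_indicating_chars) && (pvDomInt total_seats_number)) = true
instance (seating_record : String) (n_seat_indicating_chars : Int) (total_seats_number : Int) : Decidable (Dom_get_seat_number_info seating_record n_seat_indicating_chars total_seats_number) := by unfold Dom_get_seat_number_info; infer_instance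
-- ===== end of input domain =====

-- B replaces the materialised seat list and its repeated slicing by low-index/length
-- halving arithmetic (objective: alternative algorithm, no list is built).

-- ===== PORT A =====
-- one step of A's for-body: state = (seat_list, mid_point); the two Python `if`s in order
def pvStepA (st : List Int × Int) (char : Char) : List Int × Int :=
  let st1 :=
    if char = 'L' then
      let l := PySem.List.slice st.1 none (some st.2)
      (l, PySem.Int.truncdiv (l.length : Int) 2)
    else st
  if char = 'R' then
    let l := PySem.List.slice st1.1 (some st1.2) none
    (l, PySem.Int.truncdiv (l.length : Int) 2)
  else st1

def get_seat_number_info (seating_record : String) (n_seat_indicating_chars : Int) (total_seats_number : Int) : Int :=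
  let seat_list : List Int := PySem.List.pyRange 0 total_seats_number 1
  let mid_point : Int := PySem.Int.truncdiv total_seats_number 2   -- int(total_seats_number / 2)
  let st := (PySem.Str.slice seating_record (some n_seat_indicating_chars) none).toList.foldl
      pvStepA (seat_list, mid_point)
  (PySem.List.pyGet? st.1 0).getD 0   -- seat_list[0]; Pre_ excludes the IndexError (none) case

-- ===== PORT B =====
-- one step of B's for-body: state = (low, length)
def pvStepB (st : Int × Int) (char : Char) : Int × Int :=
  if char = 'L' then (st.1, PySem.Int.floordiv st.2 2)
  else if char = 'R' then
    let half := PySem.Int.floordiv st.2 2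
    (st.1 + half, st.2 - half)
  else st

def get_seat_number_info_alt (seating_record : String) (n_seat_indicating_chars : Int) (total_seats_number : Int) : Int :=
  let st := (PySem.Str.slice seating_record (some n_seat_indicating_chars) none).toList.foldl
      pvStepB (0, total_seats_number)
  st.1

-- ===== PRECONDITION & SPEC =====
-- the L/R characters A reacts to, in order
def pvOps (seating_record : String) (n_seat_indicating_chars : Int) : List Char :=
  (PySem.Str.slice seating_record (some n_seat_indicating_chars) none).toList.filter
    (fun c => c == 'L' || c == 'R')

-- binary weight of the op string: op i (0-based) contributes 2^i when it is 'R'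
def pvC (ops : List Char) : Int :=
  ops.foldr (fun c acc => (if c == 'R' then 1 else 0) + 2 * acc) 0

-- A raises IndexError exactly outside this condition: the seat list starts empty
-- (total ≤ 0) or the L/R halvings empty it (total + pvC < 2^#ops).
def Pre_get_seat_number_info (seating_record : String) (n_seat_indicating_chars : Int) (total_seats_number : Int) : Prop :=
  1 ≤ total_seats_number ∧
  (2 : Int) ^ (pvOps seating_record n_seat_indicating_chars).length ≤
    total_seats_number + pvC (pvOps seating_record n_seat_indicating_chars)
instance (seating_record : String) (n_seat_indicating_chars : Int) (total_seats_number : Int) : Decidable (Pre_get_seat_number_info seating_record n_seat_indicating_chars total_seats_number) := by unfold Pre_get_seat_number_info; infer_instance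

def pvWitness_get_seat_number_info : String × Int × Int := ("RLR", 0, 8)

def Spec_get_seat_number_info (seating_record : String) (n_seat_indicating_chars : Int) (total_seats_number : Int) (out : Int) : Prop := out = get_seat_number_info_alt seating_record n_seat_indicating_chars total_seats_number
instance (seating_record : String) (n_seat_indicating_chars : Int) (total_seats_number : Int) (out : Int) : Decidable (Spec_get_seat_number_info seating_record n_seat_indicating_chars total_seats_number out) := by unfold Spec_get_seat_number_info; infer_instance

-- ===== CLAIM (what is proved, stated in full; the proofs are below) =====
def Claim_equal_get_seat_number_info : Prop := ∀ (seating_record : String) (n_seat_indicating_chars : Int) (total_seats_number : Int), Dom_get_seat_number_info seating_record n_seat_indicating_chars total_seats_number → Pre_get_seat_number_info seating_record n_seat_indicating_chars total_seats_number → Spec_get_seat_number_info seating_record n_seat_indicating_chars total_seats_number (get_seat_number_info seating_record n_seat_indicating_chars total_seats_number)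
-- ===== LEMMAS AND PROOFS =====

-- recurrences of the binary weight pvC
theorem pvC_nil : pvC [] = 0 := by simp [pvC]
theorem pvC_cons_L (ops : List Char) : pvC ('L' :: ops) = 2 * pvC ops := by
  simp [pvC]
theorem pvC_cons_R (ops : List Char) : pvC ('R' :: ops) = 1 + 2 * pvC ops := by
  simp [pvC]

theorem truncdiv_two_nonneg (a : Int) (h : 0 ≤ a) :
    PySem.Int.truncdiv a 2 = a / 2 := by
  simp only [PySem.Int.truncdiv]
  rw [Int.tdiv_eq_ediv, if_pos (Or.inl h), add_zero]

-- slicing a contiguous integer range: xs[:m] and xs[m:]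
theorem slice_pyRange_to (low len m : Int) (h0 : 0 ≤ m) (hm : m ≤ len) :
    PySem.List.slice (PySem.List.pyRange low (low + len) 1) none (some m)
      = PySem.List.pyRange low (low + m) 1 := by
  rw [PySem.List.slice_to _ h0,
      PySem.List.pyRange_one_append low (low + m) (low + len) (by omega) (by omega)]
  have hl : m.toNat = (PySem.List.pyRange low (low + m) 1).length := by
    rw [PySem.List.length_pyRange_one]; omega
  rw [hl, List.take_left]

theorem slice_pyRange_from (low len m : Int) (h0 : 0 ≤ m) (hm : m ≤ len) :
    PySem.List.slice (PySem.List.pyRange low (low + len) 1) (some m) none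
      = PySem.List.pyRange (low + m) (low + len) 1 := by
  rw [PySem.List.slice_from _ h0,
      PySem.List.pyRange_one_append low (low + m) (low + len) (by omega) (by omega)]
  have hl : m.toNat = (PySem.List.pyRange low (low + m) 1).length := by
    rw [PySem.List.length_pyRange_one]; omega
  rw [hl, List.drop_left]

-- main invariant: along the whole record, A's state is the range described by B's state,
-- A's mid_point is length/2, and the Pre_ budget keeps the length positive
theorem pv_invariant (chars : List Char) : ∀ (low len : Int), 0 ≤ len →
    2 ^ (chars.filter (fun c => c == 'L' || c == 'R')).length ≤
      len + pvC (chars.filter (fun c => c == 'L' || c == 'R')) →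
    (chars.foldl pvStepA (PySem.List.pyRange low (low + len) 1, len / 2)).1
        = PySem.List.pyRange (chars.foldl pvStepB (low, len)).1
            ((chars.foldl pvStepB (low, len)).1 + (chars.foldl pvStepB (low, len)).2) 1 ∧
    1 ≤ (chars.foldl pvStepB (low, len)).2 := by
  induction chars with
  | nil =>
    intro low len h0 hbudget
    rw [List.filter_nil, List.length_nil, pvC_nil] at hbudget
    simp
    omega
  | cons c rest ih =>
    intro low len h0 hbudget
    by_cases hL : c = 'L'
    · subst hL
      have hfil : (('L' :: rest).filter (fun c => c == 'L' || c == 'R'))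
          = 'L' :: rest.filter (fun c => c == 'L' || c == 'R') := by simp
      rw [hfil] at hbudget
      rw [pvC_cons_L, List.length_cons, pow_succ] at hbudget
      have hbudget' : 2 ^ (rest.filter (fun c => c == 'L' || c == 'R')).length ≤
          len / 2 + pvC (rest.filter (fun c => c == 'L' || c == 'R')) := by
        omega
      have hstepA : pvStepA (PySem.List.pyRange low (low + len) 1, len / 2) 'L'
          = (PySem.List.pyRange low (low + len / 2) 1, (len / 2) / 2) := by
        simp only [pvStepA, Char.reduceEq, reduceIte]
        rw [slice_pyRange_to low len (len / 2) (by omega) (by omega),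
            truncdiv_two_nonneg _ (by positivity), PySem.List.length_pyRange_one]
        simp only [Prod.mk.injEq]
        exact ⟨trivial, by omega⟩
      have hstepB : pvStepB (low, len) 'L' = (low, len / 2) := by
        simp [pvStepB]
      rw [List.foldl_cons, List.foldl_cons, hstepA, hstepB]
      exact ih low (len / 2) (by positivity) hbudget'
    · by_cases hR : c = 'R'
      · subst hR
        have hfil : (('R' :: rest).filter (fun c => c == 'L' || c == 'R'))
            = 'R' :: rest.filter (fun c => c == 'L' || c == 'R') := by simp
        rw [hfil] at hbudget
        rw [pvC_cons_R, List.length_cons, pow_succ] at hbudget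
        have hbudget' : 2 ^ (rest.filter (fun c => c == 'L' || c == 'R')).length ≤
            (len - len / 2) + pvC (rest.filter (fun c => c == 'L' || c == 'R')) := by
          omega
        have hstepA : pvStepA (PySem.List.pyRange low (low + len) 1, len / 2) 'R'
            = (PySem.List.pyRange (low + len / 2) (low + len) 1, (len - len / 2) / 2) := by
          simp only [pvStepA, Char.reduceEq, reduceIte]
          rw [slice_pyRange_from low len (len / 2) (by omega) (by omega),
              truncdiv_two_nonneg _ (by positivity), PySem.List.length_pyRange_one]
          simp only [Prod.mk.injEq]
          exact ⟨trivial, by omega⟩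
        have hstepB : pvStepB (low, len) 'R' = (low + len / 2, len - len / 2) := by
          simp [pvStepB]
        rw [List.foldl_cons, List.foldl_cons, hstepA, hstepB]
        have h2 : PySem.List.pyRange (low + len / 2) (low + len) 1
            = PySem.List.pyRange (low + len / 2) ((low + len / 2) + (len - len / 2)) 1 := by
          congr 1; omega
        rw [h2]
        exact ih (low + len / 2) (len - len / 2) (by omega) hbudget'
      · have hfil : ((c :: rest).filter (fun c => c == 'L' || c == 'R'))
            = rest.filter (fun c => c == 'L' || c == 'R') := by
          simp [hL, hR]
        rw [hfil] at hbudget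
        have hstepA : pvStepA (PySem.List.pyRange low (low + len) 1, len / 2) c
            = (PySem.List.pyRange low (low + len) 1, len / 2) := by
          simp [pvStepA, hL, hR]
        have hstepB : pvStepB (low, len) c = (low, len) := by
          simp [pvStepB, hL, hR]
        rw [List.foldl_cons, List.foldl_cons, hstepA, hstepB]
        exact ih low len h0 hbudget

-- ===== VERDICT (by name: the statement is the Claim_ definition above) =====
theorem get_seat_number_info_spec : Claim_equal_get_seat_number_info := by
  intro s n t _ hpre
  obtain ⟨ht, hbudget⟩ := hpre
  unfold Spec_get_seat_number_info get_seat_number_info get_seat_number_info_alt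
  simp only []
  have hinv := pv_invariant (PySem.Str.slice s (some n) none).toList 0 t (by omega)
    (by simpa [pvOps] using hbudget)
  rw [truncdiv_two_nonneg t (by omega)]
  have h0 : PySem.List.pyRange 0 t 1 = PySem.List.pyRange 0 (0 + t) 1 := by norm_num
  rw [h0]
  obtain ⟨h1, h2⟩ := hinv
  rw [h1]
  set stB := (PySem.Str.slice s (some n) none).toList.foldl pvStepB (0, t) with hstB
  rw [PySem.List.pyRange_one_cons (by omega)]
  simp
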